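-- pv_equiv track=rewrite | github.com/OttoMess/Adventofcode | 2024/day1.py | appearance_part2
-- ===== SOURCE A (Python) =====
-- from collections import Counter
--
-- def appearance_part2(list1, list2):
--     collect = 0
--     appearances = Counter(list2)
--     present = appearances.keys()
--     for i in list1:
--         if i in present:
--             collect += i * appearances[i]
--     return collect
-- ===== SOURCE B (Python) =====
-- from collections import Counter
--
-- def appearance_part2(list1, list2):
--     cnt1 = Counter(list1)
--     cnt2 = Counter(list2)
--     total = 0
--     for v, c in cnt1.items():
--         total += v * c * cnt2[v]
--     return total
-- ===== Notes on version B (the rewrite author's own statement) =====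
-- stated objective: alternative
-- what changed: Instead of scanning every element of list1 with a membership guard and a Counter lookup, B builds frequency tables for both lists and accumulates v * cnt1[v] * cnt2[v] over the distinct values of list1 once.
import Mathlib
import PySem

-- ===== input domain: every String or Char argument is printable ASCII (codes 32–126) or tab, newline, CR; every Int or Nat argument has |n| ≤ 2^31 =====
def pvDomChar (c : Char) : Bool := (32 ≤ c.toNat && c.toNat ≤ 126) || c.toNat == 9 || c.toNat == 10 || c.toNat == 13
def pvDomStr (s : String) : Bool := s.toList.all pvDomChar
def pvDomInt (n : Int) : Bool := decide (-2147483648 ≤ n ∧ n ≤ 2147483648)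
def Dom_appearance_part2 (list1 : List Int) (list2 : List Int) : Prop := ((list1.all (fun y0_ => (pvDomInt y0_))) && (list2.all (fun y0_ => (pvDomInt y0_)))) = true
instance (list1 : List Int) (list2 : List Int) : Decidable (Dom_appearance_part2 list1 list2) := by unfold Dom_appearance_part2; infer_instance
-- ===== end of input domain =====

-- B replaces A's per-element scan of list1 (membership guard + Counter lookup) with two frequency
-- tables, accumulating v * cnt1[v] * cnt2[v] over the distinct values of list1 (objective: alternative).

-- ===== PORT A =====
def appearance_part2 (list1 : List Int) (list2 : List Int) : Int :=
  let appearances := PySem.Dict.counter list2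
  list1.foldl (fun collect i =>
    if appearances.contains i then collect + i * appearances.getD i 0 else collect) 0

-- ===== PORT B =====
def appearance_part2_alt (list1 : List Int) (list2 : List Int) : Int :=
  let cnt1 := PySem.Dict.counter list1
  let cnt2 := PySem.Dict.counter list2
  cnt1.items.foldl (fun total vc => total + vc.1 * vc.2 * cnt2.getD vc.1 0) 0

-- ===== PRECONDITION & SPEC =====
def Spec_appearance_part2 (list1 : List Int) (list2 : List Int) (out : Int) : Prop := out = appearance_part2_alt list1 list2
instance (list1 : List Int) (list2 : List Int) (out : Int) : Decidable (Spec_appearance_part2 list1 list2 out) := by unfold Spec_appearance_part2; infer_instance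

-- ===== CLAIM (what is proved, stated in full; the proofs are below) =====
def Claim_equal_appearance_part2 : Prop := ∀ (list1 : List Int) (list2 : List Int), Dom_appearance_part2 list1 list2 → Spec_appearance_part2 list1 list2 (appearance_part2 list1 list2)

-- ===== LEMMAS AND PROOFS =====

-- a single term of a sum over a duplicate-free list
lemma sum_map_ite_single (S : List Int) (hn : S.Nodup) (x : Int) (hx : x ∈ S) (f : Int → Int) :
    (S.map (fun k => if x = k then f k else 0)).sum = f x := by
  induction S with
  | nil => cases hx
  | cons a t ih =>
    rcases List.mem_cons.mp hx with h | h
    · subst h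
      have hnot : x ∉ t := (List.nodup_cons.mp hn).1
      have : (t.map (fun k => if x = k then f k else 0)).sum = 0 := by
        apply List.sum_eq_zero
        intro y hy
        rcases List.mem_map.mp hy with ⟨k, hk, rfl⟩
        have : x ≠ k := fun h => hnot (h ▸ hk)
        simp [this]
      simp [this]
    · have hne : x ≠ a := fun hxa => (List.nodup_cons.mp hn).1 (hxa ▸ h)
      simp [hne, ih (List.nodup_cons.mp hn).2 h]

-- sum over a list = sum over its distinct values weighted by multiplicity
lemma sum_map_eq_sum_set_count (f : Int → Int) (l : List Int) :
    (l.map f).sum = ((PySem.Set.ofList l).map (fun k => (l.count k : Int) * f k)).sum := by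
  induction l using List.reverseRecOn with
  | nil => simp [PySem.Set.ofList]
  | append_singleton t x ih =>
    have hset : PySem.Set.ofList (t ++ [x]) = PySem.Set.add (PySem.Set.ofList t) x := by
      rw [PySem.Set.ofList_eq_foldl, PySem.Set.ofList_eq_foldl, List.foldl_append]
      rfl
    have hcnt : ∀ k : Int, ((t ++ [x]).count k : Int) = (t.count k : Int) + (if x = k then 1 else 0) := by
      intro k
      rcases eq_or_ne x k with h | h
      · subst h; simp [List.count_append]
      · have hz : List.count k [x] = 0 :=
          List.count_eq_zero_of_not_mem (by simp [Ne.symm h])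
        simp [List.count_append, hz, h]
    by_cases hx : x ∈ PySem.Set.ofList t
    · have hadd : PySem.Set.add (PySem.Set.ofList t) x = PySem.Set.ofList t := by
        simp [PySem.Set.add, PySem.Set.contains, hx]
      rw [hset, hadd]
      have : ((PySem.Set.ofList t).map (fun k => ((t ++ [x]).count k : Int) * f k)).sum
          = ((PySem.Set.ofList t).map (fun k => (t.count k : Int) * f k)).sum
            + ((PySem.Set.ofList t).map (fun k => if x = k then f k else 0)).sum := by
        rw [← List.sum_map_add]
        apply congrArg
        apply List.map_congr_left
        intro k _
        rw [hcnt k]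
        by_cases h : x = k <;> simp [h]
        ring
      rw [this, sum_map_ite_single _ (PySem.Set.nodup_ofList t) x hx f, ← ih]
      simp
    · have hadd : PySem.Set.add (PySem.Set.ofList t) x = PySem.Set.ofList t ++ [x] := by
        simp [PySem.Set.add, PySem.Set.contains, hx]
      have hxt : x ∉ t := fun h => hx ((PySem.Set.mem_ofList t x).mpr h)
      rw [hset, hadd, List.map_append, List.sum_append, List.map_append, List.sum_append]
      have h1 : ((PySem.Set.ofList t).map (fun k => ((t ++ [x]).count k : Int) * f k))
          = ((PySem.Set.ofList t).map (fun k => (t.count k : Int) * f k)) := by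
        apply List.map_congr_left
        intro k hk
        have hne : x ≠ k := fun h => hxt (h ▸ (PySem.Set.mem_ofList t k).mp hk)
        rw [hcnt k]
        simp [hne]
      rw [h1]
      have h2 : ((t ++ [x]).count x : Int) = 0 + 1 := by
        rw [hcnt x]
        simp [List.count_eq_zero_of_not_mem hxt]
      rw [← ih]
      simp only [List.map_cons, List.map_nil, List.sum_cons, List.sum_nil]
      rw [h2]
      ring

lemma appearance_part2_eq_sum (list1 list2 : List Int) :
    appearance_part2 list1 list2 = (list1.map (fun i => i * (list2.count i : Int))).sum := by
  rw [show appearance_part2 list1 list2 = List.foldl (fun collect i =>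
      if (PySem.Dict.counter list2).contains i then collect + i * (PySem.Dict.counter list2).getD i 0
      else collect) 0 list1 from rfl]
  have hstep : ∀ (acc : Int) (i : Int), i ∈ list1 →
      (if (PySem.Dict.counter list2).contains i then acc + i * (PySem.Dict.counter list2).getD i 0 else acc)
        = acc + i * (list2.count i : Int) := by
    intro acc i _
    by_cases h : i ∈ list2
    · simp [PySem.Dict.contains_counter, PySem.Dict.getD_counter, h]
    · simp [PySem.Dict.contains_counter, h, List.count_eq_zero_of_not_mem h]
  rw [List.foldl_ext _ _ _ (fun a b hb => hstep a b hb), PySem.List.foldl_add]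
  simp

lemma appearance_part2_alt_eq_sum (list1 list2 : List Int) :
    appearance_part2_alt list1 list2
      = ((PySem.Set.ofList list1).map (fun k => k * (list1.count k : Int) * (list2.count k : Int))).sum := by
  rw [show appearance_part2_alt list1 list2 = (PySem.Dict.counter list1).items.foldl
      (fun total vc => total + vc.1 * vc.2 * (PySem.Dict.counter list2).getD vc.1 0) 0 from rfl]
  rw [PySem.List.foldl_add (g := fun vc : Int × Int => vc.1 * vc.2 * (PySem.Dict.counter list2).getD vc.1 0)]
  rw [PySem.Dict.items_counter, List.map_map]
  simp [PySem.Dict.getD_counter, Function.comp_def]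

-- ===== VERDICT (by name: the statement is the Claim_ definition above) =====
theorem appearance_part2_spec : Claim_equal_appearance_part2 := by
  intro list1 list2 _
  unfold Spec_appearance_part2
  rw [appearance_part2_eq_sum, appearance_part2_alt_eq_sum,
    sum_map_eq_sum_set_count (fun i => i * (list2.count i : Int)) list1]
  apply congrArg
  apply List.map_congr_left
  intro k _
  ring
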